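-- pv_equiv track=rewrite | github.com/PadmajaGogulamudi/githubdemo | codewars8.py | all_continents
-- ===== SOURCE A (Python) =====
-- def all_continents(lst):
--     l=list(('Africa','Americas','Asia','Europe','Oceania'))
--     for i in lst:
--         for j in i:
--             if j=='continent':
--                 if i['continent'] in l:
--                     l.remove(i['continent'])
--     if len(l)==0:
--         return True
--     else:
--         return False
-- ===== SOURCE B (Python) =====
-- def all_continents(lst):
--     present = {i['continent'] for i in lst if 'continent' in i}
--     return {'Africa', 'Americas', 'Asia', 'Europe', 'Oceania'} <= present
-- ===== Notes on version B (the rewrite author's own statement) =====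
-- stated objective: idiomatic
-- what changed: Replaces A's mutable shrinking-list depletion (inner key scan plus list.remove per hit) with a single set comprehension of present continents followed by one subset test.
import Mathlib
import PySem

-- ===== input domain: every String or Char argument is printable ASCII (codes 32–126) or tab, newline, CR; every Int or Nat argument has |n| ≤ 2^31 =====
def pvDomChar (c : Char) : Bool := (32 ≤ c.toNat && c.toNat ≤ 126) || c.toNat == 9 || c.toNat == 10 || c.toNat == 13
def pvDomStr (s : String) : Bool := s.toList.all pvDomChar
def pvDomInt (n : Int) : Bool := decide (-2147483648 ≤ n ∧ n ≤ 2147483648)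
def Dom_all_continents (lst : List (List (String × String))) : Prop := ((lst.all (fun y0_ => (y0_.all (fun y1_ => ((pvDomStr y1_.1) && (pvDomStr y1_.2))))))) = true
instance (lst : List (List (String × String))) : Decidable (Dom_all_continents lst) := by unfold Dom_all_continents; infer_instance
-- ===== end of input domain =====

-- B builds the set of present continents once and does one subset test; A depletes a
-- mutable 5-element list via an inner key scan and list.remove. Return values agree everywhere.

-- ===== PORT A =====
-- 'if i['continent'] in l: l.remove(i['continent'])' (remove is guarded, so remove? is some)
def pyRemoveIfMem (l : List String) (v : String) : List String :=
  if l.contains v then (PySem.List.remove? l v).getD l else l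

-- body of 'for j in i: if j == 'continent': …' (j ranges over the dict's keys)
def contStep (d : PySem.Dict String String) (l : List String) (j : String) : List String :=
  if j == "continent" then
    match d.get? "continent" with
    | some v => pyRemoveIfMem l v
    | none => l
  else l

def all_continents (lst : List (List (String × String))) : Bool :=
  decide ((lst.foldl (fun l i =>
    (PySem.Dict.ofList i).keys.foldl (contStep (PySem.Dict.ofList i)) l)
    ["Africa", "Americas", "Asia", "Europe", "Oceania"]).length = 0)

-- ===== PORT B =====
def all_continents_alt (lst : List (List (String × String))) : Bool :=
  PySem.Set.issubset
    (PySem.Set.ofList ["Africa", "Americas", "Asia", "Europe", "Oceania"])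
    (PySem.Set.ofList (lst.filterMap (fun i => (PySem.Dict.ofList i).get? "continent")))

-- ===== PRECONDITION & SPEC =====
def Spec_all_continents (lst : List (List (String × String))) (out : Bool) : Prop := out = all_continents_alt lst
instance (lst : List (List (String × String))) (out : Bool) : Decidable (Spec_all_continents lst out) := by unfold Spec_all_continents; infer_instance

-- ===== CLAIM (what is proved, stated in full; the proofs are below) =====
def Claim_equal_all_continents : Prop := ∀ (lst : List (List (String × String))), Dom_all_continents lst → Spec_all_continents lst (all_continents lst)

-- ===== LEMMAS AND PROOFS =====

-- if "continent" is not among the keys, the inner fold is the identity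
lemma contStep_fold_id (d : PySem.Dict String String) (ks : List String)
    (h : "continent" ∉ ks) (l : List String) :
    ks.foldl (contStep d) l = l := by
  induction ks generalizing l with
  | nil => rfl
  | cons k ks ih =>
    simp only [List.mem_cons, not_or] at h
    simp only [List.foldl_cons, contStep, beq_iff_eq]
    rw [if_neg (fun hk => h.1 hk.symm), ih h.2]

-- the inner fold over the dict's (nodup) keys acts once, iff the key is present
lemma contStep_fold (d : PySem.Dict String String) (ks : List String)
    (hnd : ks.Nodup) (l : List String) :
    ks.foldl (contStep d) l =
      if "continent" ∈ ks then
        (d.get? "continent").elim l (pyRemoveIfMem l)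
      else l := by
  induction ks generalizing l with
  | nil => rfl
  | cons k ks ih =>
    rcases List.nodup_cons.mp hnd with ⟨hk, hnd'⟩
    by_cases h : k = "continent"
    · subst h
      simp only [List.foldl_cons, contStep, beq_self_eq_true, if_true]
      cases hg : d.get? "continent" with
      | none => rw [contStep_fold_id d ks hk]; simp
      | some v => rw [contStep_fold_id d ks hk]; simp
    · simp only [List.foldl_cons, contStep, beq_iff_eq]
      rw [if_neg h, ih hnd']
      have h' : ("continent" : String) ≠ k := fun hk => h hk.symm
      simp [h']

-- depleting a nodup list is filtering
lemma pyRemoveIfMem_eq_filter (l : List String) (hnd : l.Nodup) (v : String) :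
    pyRemoveIfMem l v = l.filter (fun c => c ≠ v) := by
  unfold pyRemoveIfMem
  by_cases h : v ∈ l
  · rw [if_pos (by simpa using h), PySem.List.remove?_eq_some_erase l v h]
    simpa using List.Nodup.erase_eq_filter hnd v
  · rw [if_neg (by simpa using h)]
    exact (List.filter_eq_self.mpr (fun c hc => by
      simp only [decide_eq_true_eq]
      rintro rfl; exact h hc)).symm

-- the outer loop's state is the initial list filtered by the collected values
lemma outer_fold_eq_filter (lst : List (List (String × String))) (l : List String)
    (hnd : l.Nodup) :
    lst.foldl (fun l i =>
        let d := PySem.Dict.ofList i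
        d.keys.foldl (contStep d) l) l =
      l.filter (fun c =>
        !(lst.filterMap (fun i => (PySem.Dict.ofList i).get? "continent")).contains c) := by
  induction lst generalizing l with
  | nil => simp
  | cons i lst ih =>
    simp only [List.foldl_cons]
    rw [contStep_fold _ _ (PySem.Dict.nodup_keys_ofList i) l]
    rcases hg : (PySem.Dict.ofList i).get? "continent" with _ | v
    · have hm : "continent" ∉ (PySem.Dict.ofList i).keys :=
        (PySem.Dict.get?_eq_none_iff_not_mem_keys _ _).mp hg
      rw [if_neg hm, ih l hnd]
      simp [hg]
    · have hm : "continent" ∈ (PySem.Dict.ofList i).keys := by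
        by_contra hm
        rw [(PySem.Dict.get?_eq_none_iff_not_mem_keys _ _).mpr hm] at hg
        simp at hg
      rw [if_pos hm, Option.elim_some]
      rw [pyRemoveIfMem_eq_filter l hnd v,
        ih _ (List.Nodup.filter _ hnd), List.filter_filter]
      simp only [List.filterMap_cons, hg]
      apply List.filter_congr
      intro c _
      simp [eq_comm, Bool.and_comm]

-- ===== VERDICT (by name: the statement is the Claim_ definition above) =====
theorem all_continents_spec : Claim_equal_all_continents := by
  intro lst _
  show all_continents lst = all_continents_alt lst
  unfold all_continents all_continents_alt
  rw [outer_fold_eq_filter lst _ (by decide)]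
  rw [Bool.eq_iff_iff]
  simp [List.length_eq_zero_iff, List.filter_eq_nil_iff,
    PySem.Set.issubset_iff, PySem.Set.mem_ofList]
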